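-- pv_equiv track=rewrite | github.com/KS-HTK/adventOfCode23 | day11/day11.py | measure_distance
-- ===== SOURCE A (Python) =====
-- from typing import List, Tuple
--
-- def measure_distance(a: Tuple[int, int], b: Tuple[int, int], universe: List[str], expansion: int) -> int:
--   x, y = a
--   x2, y2 = b
--   d = 0
--   while x != x2:
--     x = x-1 if x > x2 else x+1
--     if universe[x][y] != '1':
--       d+=1
--       continue
--     d += expansion
--
--   while y != y2:
--     y = y-1 if y > y2 else y+1
--     if universe[x][y] != '1':
--       d += 1
--       continue
--     d += expansion
--   return d
-- ===== SOURCE B (Python) =====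
-- from typing import List, Tuple
--
-- def _span(cell, lo, hi):
--   # total weight of cells lo..hi-1, by recursively halving the interval
--   if hi - lo <= 1:
--     return cell(lo) if hi > lo else 0
--   m = (lo + hi) // 2
--   return _span(cell, lo, m) + _span(cell, m, hi)
--
-- def measure_distance(a: Tuple[int, int], b: Tuple[int, int], universe: List[str], expansion: int) -> int:
--   (x, y), (x2, y2) = a, b
--   row = lambda i: expansion if universe[i][y] == '1' else 1
--   col = lambda j: expansion if universe[x2][j] == '1' else 1
--   d = _span(row, x2, x) if x > x2 else _span(row, x + 1, x2 + 1)
--   d += _span(col, y2, y) if y > y2 else _span(col, y + 1, y2 + 1)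
--   return d
-- ===== Notes on version B (the rewrite author's own statement) =====
-- stated objective: alternative
-- what changed: Replaces A's per-step while-loop walks (mutating the coordinate and accumulating 1-or-expansion each step) by a divide-and-conquer: each leg's weighted length is computed by recursively splitting the visited index interval at its floor midpoint and adding the two halves, with a one-cell base case; correct because the per-cell weights are summed over the same index set in any association order.
import Mathlib
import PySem

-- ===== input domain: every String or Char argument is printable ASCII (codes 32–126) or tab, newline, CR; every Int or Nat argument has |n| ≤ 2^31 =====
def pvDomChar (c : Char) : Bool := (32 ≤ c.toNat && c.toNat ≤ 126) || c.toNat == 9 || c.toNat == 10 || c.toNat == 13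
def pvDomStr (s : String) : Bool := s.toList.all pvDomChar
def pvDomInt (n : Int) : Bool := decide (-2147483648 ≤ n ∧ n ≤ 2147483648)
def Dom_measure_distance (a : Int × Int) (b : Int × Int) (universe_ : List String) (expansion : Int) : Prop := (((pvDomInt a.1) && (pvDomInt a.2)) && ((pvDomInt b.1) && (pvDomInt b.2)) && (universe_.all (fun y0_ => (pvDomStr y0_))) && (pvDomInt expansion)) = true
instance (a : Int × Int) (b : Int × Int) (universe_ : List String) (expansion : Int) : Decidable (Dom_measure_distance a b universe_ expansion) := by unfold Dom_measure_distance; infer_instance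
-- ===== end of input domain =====

-- B replaces A's per-step while-loop walks by divide-and-conquer: each leg's weighted length is
-- the sum of its two half-intervals, split at the floor midpoint (objective: alternative).


-- ===== PORT A =====
-- universe[i][j] as a Char, Python-exact (negative indices wrap via pyGet?); the default ' ' is
-- only reached where the Python raises IndexError (excluded by Pre_)
def cellAt (u : List String) (i j : Int) : Char :=
  ((PySem.List.pyGet? u i).bind (fun s => PySem.Str.pyGet? s j)).getD ' '

-- 'while p != p2: p = p-1 if p > p2 else p+1; d += f(p)' — f is the loop body's 1-vs-expansion
-- branch; the Nat argument is fuel (= the exact step count |p - p2|, supplied by walk)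
def walkAux (f : Int → Int) : Nat → Int → Int → Int → Int
  | 0, _, _, d => d
  | n + 1, p, p2, d =>
    if p = p2 then d
    else if p > p2 then walkAux f n (p - 1) p2 (d + f (p - 1))
    else walkAux f n (p + 1) p2 (d + f (p + 1))

def walk (f : Int → Int) (p p2 d : Int) : Int := walkAux f (p - p2).natAbs p p2 d

def measure_distance (a : Int × Int) (b : Int × Int) (universe_ : List String) (expansion : Int) : Int :=
  let x := a.1; let y := a.2
  let x2 := b.1; let y2 := b.2
  -- first while loop (x walks to x2, column y fixed)
  let d := walk (fun i => if cellAt universe_ i y ≠ '1' then 1 else expansion) x x2 0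
  -- second while loop; x = x2 when it starts (the first loop only stops at x = x2)
  walk (fun j => if cellAt universe_ x2 j ≠ '1' then 1 else expansion) y y2 d

-- ===== PORT B =====
-- total weight of cells lo..hi-1, by recursively halving the interval at its floor midpoint
-- (_span in Source B); the Nat argument is fuel (= the interval width, supplied by spanWalk)
def spanAux (cell : Int → Int) : Nat → Int → Int → Int
  | 0, _, _ => 0
  | n + 1, lo, hi =>
    if hi - lo ≤ 1 then (if hi > lo then cell lo else 0)
    else
      spanAux cell n lo (PySem.Int.floordiv (lo + hi) 2)
        + spanAux cell n (PySem.Int.floordiv (lo + hi) 2) hi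

def spanWalk (cell : Int → Int) (lo hi : Int) : Int := spanAux cell (hi - lo).toNat lo hi

def measure_distance_alt (a : Int × Int) (b : Int × Int) (universe_ : List String) (expansion : Int) : Int :=
  let x := a.1; let y := a.2
  let x2 := b.1; let y2 := b.2
  let row := fun i => if cellAt universe_ i y = '1' then expansion else (1 : Int)
  let col := fun j => if cellAt universe_ x2 j = '1' then expansion else (1 : Int)
  let d := if x > x2 then spanWalk row x2 x else spanWalk row (x + 1) (x2 + 1)
  d + (if y > y2 then spanWalk col y2 y else spanWalk col (y + 1) (y2 + 1))

-- ===== PRECONDITION & SPEC =====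
-- Pre_ excludes exactly the inputs on which Python A raises IndexError: some visited cell is out of
-- Python's (wraparound) index range.  The visited rows form the contiguous interval [lo, hi] below
-- (the x-x2 span minus the start x), read at column a.2; the visited columns form [lo2, hi2] (the
-- y-y2 span minus the start y), read at row b.1.
def Pre_measure_distance (a : Int × Int) (b : Int × Int) (universe_ : List String) (expansion : Int) : Prop :=
  let n : Int := universe_.length
  let lo : Int := if a.1 > b.1 then b.1 else a.1 + 1
  let hi : Int := if a.1 > b.1 then a.1 - 1 else b.1
  (a.1 = b.1 ∨ (-n ≤ lo ∧ hi < n)) ∧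
  (∀ k < universe_.length,
      ((lo ≤ (k : Int) ∧ (k : Int) ≤ hi) ∨ (lo ≤ (k : Int) - n ∧ (k : Int) - n ≤ hi)) →
      -(((universe_.getD k "").toList.length : Nat) : Int) ≤ a.2 ∧
        a.2 < (((universe_.getD k "").toList.length : Nat) : Int)) ∧
  (a.2 = b.2 ∨
    (-n ≤ b.1 ∧ b.1 < n ∧
     -(((PySem.List.pyGetD universe_ b.1 "").toList.length : Nat) : Int)
         ≤ (if a.2 > b.2 then b.2 else a.2 + 1) ∧
     (if a.2 > b.2 then a.2 - 1 else b.2)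
         < (((PySem.List.pyGetD universe_ b.1 "").toList.length : Nat) : Int)))
instance (a : Int × Int) (b : Int × Int) (universe_ : List String) (expansion : Int) : Decidable (Pre_measure_distance a b universe_ expansion) := by unfold Pre_measure_distance; infer_instance

def pvWitness_measure_distance : (Int × Int) × (Int × Int) × List String × Int := ((0, 0), (1, 1), ["00", "00"], 2)

def Spec_measure_distance (a : Int × Int) (b : Int × Int) (universe_ : List String) (expansion : Int) (out : Int) : Prop := out = measure_distance_alt a b universe_ expansion
instance (a : Int × Int) (b : Int × Int) (universe_ : List String) (expansion : Int) (out : Int) : Decidable (Spec_measure_distance a b universe_ expansion out) := by unfold Spec_measure_distance; infer_instance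

-- ===== CLAIM (what is proved, stated in full; the proofs are below) =====
def Claim_equal_measure_distance : Prop := ∀ (a : Int × Int) (b : Int × Int) (universe_ : List String) (expansion : Int), Dom_measure_distance a b universe_ expansion → Pre_measure_distance a b universe_ expansion → Spec_measure_distance a b universe_ expansion (measure_distance a b universe_ expansion)

-- ===== LEMMAS AND PROOFS =====

-- A's walk accumulates f over exactly the visited indices: [p2, p) descending, (p, p2] ascending.
theorem walkAux_eq_sum (f : Int → Int) : ∀ (n : Nat) (p p2 d : Int), (p - p2).natAbs ≤ n →
    walkAux f n p p2 d
      = d + ((if p > p2 then PySem.List.pyRange p2 p 1 else PySem.List.pyRange (p + 1) (p2 + 1) 1).map f).sum := by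
  intro n
  induction n with
  | zero =>
    intro p p2 d hn
    have h : p = p2 := by omega
    subst h
    simp [walkAux, PySem.List.pyRange_one_eq_nil (le_refl (p + 1))]
  | succ n ih =>
    intro p p2 d hn
    rw [walkAux]
    by_cases h : p = p2
    · subst h
      simp [PySem.List.pyRange_one_eq_nil (le_refl (p + 1))]
    · by_cases hgt : p > p2
      · simp only [if_neg h, if_pos hgt]
        rw [ih (p - 1) p2 _ (by omega)]
        by_cases h2 : p - 1 > p2
        · have hsplit : PySem.List.pyRange p2 p 1 = PySem.List.pyRange p2 (p - 1) 1 ++ [p - 1] := by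
            have := PySem.List.pyRange_one_succ_right (a := p2) (b := p - 1) (by omega)
            simpa [show p - 1 + 1 = p by ring] using this
          simp only [if_pos h2, hsplit, List.map_append, List.sum_append, List.map_cons,
            List.map_nil, List.sum_cons, List.sum_nil]
          ring
        · have hp : p = p2 + 1 := by omega
          subst hp
          have hnil : PySem.List.pyRange (p2 + 1 - 1 + 1) (p2 + 1) 1 = [] :=
            PySem.List.pyRange_one_eq_nil (by omega)
          simp only [if_neg h2, hnil, List.map_nil, List.sum_nil,
            PySem.List.pyRange_one_singleton, List.map_cons, List.sum_cons]
          ring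
      · simp only [if_neg h, if_neg hgt]
        rw [ih (p + 1) p2 _ (by omega)]
        have h2 : ¬ p + 1 > p2 := by omega
        have hcons : PySem.List.pyRange (p + 1) (p2 + 1) 1
            = (p + 1) :: PySem.List.pyRange (p + 1 + 1) (p2 + 1) 1 :=
          PySem.List.pyRange_one_cons (by omega)
        simp only [if_neg h2, hcons, List.map_cons, List.sum_cons]
        ring

-- B's divide-and-conquer leg equals the sum of cell over [lo, hi)
theorem spanAux_eq_sum (cell : Int → Int) : ∀ (n : Nat) (lo hi : Int), (hi - lo).toNat ≤ n →
    spanAux cell n lo hi = ((PySem.List.pyRange lo hi 1).map cell).sum := by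
  intro n
  induction n with
  | zero =>
    intro lo hi hn
    rw [spanAux, PySem.List.pyRange_one_eq_nil (by omega)]
    simp
  | succ n ih =>
    intro lo hi hn
    rw [spanAux]
    by_cases hb : hi - lo ≤ 1
    · rw [if_pos hb]
      by_cases hlt : hi > lo
      · have : hi = lo + 1 := by omega
        subst this
        simp [PySem.List.pyRange_one_singleton, hlt]
      · rw [if_neg hlt, PySem.List.pyRange_one_eq_nil (by omega)]
        simp
    · rw [if_neg hb]
      have hm : PySem.Int.floordiv (lo + hi) 2 = (lo + hi) / 2 :=
        PySem.Int.floordiv_eq_ediv_of_pos (by omega)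
      have h1 : lo < (lo + hi) / 2 := by omega
      have h2 : (lo + hi) / 2 < hi := by omega
      rw [hm, ih lo ((lo + hi) / 2) (by omega), ih ((lo + hi) / 2) hi (by omega),
        PySem.List.pyRange_one_append lo ((lo + hi) / 2) hi (by omega) (by omega)]
      simp [List.sum_append]

theorem ports_agree (a : Int × Int) (b : Int × Int) (universe_ : List String) (expansion : Int) :
    measure_distance a b universe_ expansion = measure_distance_alt a b universe_ expansion := by
  obtain ⟨x, y⟩ := a
  obtain ⟨x2, y2⟩ := b
  show walk _ y y2 (walk _ x x2 0) = _
  unfold walk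
  rw [walkAux_eq_sum _ (x - x2).natAbs x x2 0 (le_refl _),
      walkAux_eq_sum _ (y - y2).natAbs y y2 _ (le_refl _)]
  have hrow : (fun i => if cellAt universe_ i y ≠ '1' then (1 : Int) else expansion)
      = (fun i => if cellAt universe_ i y = '1' then expansion else 1) := by
    funext i; by_cases h : cellAt universe_ i y = '1' <;> simp [h]
  have hcol : (fun j => if cellAt universe_ x2 j ≠ '1' then (1 : Int) else expansion)
      = (fun j => if cellAt universe_ x2 j = '1' then expansion else 1) := by
    funext j; by_cases h : cellAt universe_ x2 j = '1' <;> simp [h]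
  show _ = (if x > x2 then spanWalk _ x2 x else spanWalk _ (x + 1) (x2 + 1))
      + (if y > y2 then spanWalk _ y2 y else spanWalk _ (y + 1) (y2 + 1))
  rw [hrow, hcol]
  unfold spanWalk
  split_ifs <;>
    rw [spanAux_eq_sum _ _ _ _ (le_refl _), spanAux_eq_sum _ _ _ _ (le_refl _)] <;> ring

-- ===== VERDICT (by name: the statement is the Claim_ definition above) =====
theorem measure_distance_spec : Claim_equal_measure_distance := by
  intro a b universe_ expansion _ _
  unfold Spec_measure_distance
  exact ports_agree a b universe_ expansion
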